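-- pv_equiv track=rewrite | github.com/srihari-122/Job-portal | ai_resume_analyzer.py | _get_fullstack_recommendations
-- ===== SOURCE A (Python) =====
-- from typing import Dict, List, Any
--
-- def _get_fullstack_recommendations(skills: List[str], experience: int) -> List[str]:
--     """Full stack specific recommendations"""
--     recommendations = []
--
--     if not any('react' in skill or 'angular' in skill or 'vue' in skill for skill in skills):
--         recommendations.append("Master a modern frontend framework (React/Angular/Vue)")
--     if not any('node.js' in skill or 'express' in skill for skill in skills):
--         recommendations.append("Learn backend development with Node.js and Express")
--     if not any('sql' in skill or 'mongodb' in skill for skill in skills):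
--         recommendations.append("Develop database design and querying skills")
--     if not any('aws' in skill or 'docker' in skill for skill in skills):
--         recommendations.append("Learn cloud deployment and containerization")
--     if not any('git' in skill for skill in skills):
--         recommendations.append("Master version control with Git and GitHub")
--
--     return recommendations
-- ===== SOURCE B (Python) =====
-- KEYWORD_CATEGORY = {
--     'react': 0, 'angular': 0, 'vue': 0,
--     'node.js': 1, 'express': 1,
--     'sql': 2, 'mongodb': 2,
--     'aws': 3, 'docker': 3,
--     'git': 4,
-- }
--
-- CATEGORY_MESSAGES = [
--     "Master a modern frontend framework (React/Angular/Vue)",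
--     "Learn backend development with Node.js and Express",
--     "Develop database design and querying skills",
--     "Learn cloud deployment and containerization",
--     "Master version control with Git and GitHub",
-- ]
--
-- def _get_fullstack_recommendations(skills, experience):
--     """One pass over the skills builds the set of covered categories;
--     recommendations are the messages of the uncovered categories."""
--     covered = set()
--     for skill in skills:
--         for kw, cat in KEYWORD_CATEGORY.items():
--             if kw in skill:
--                 covered.add(cat)
--     return [msg for cat, msg in enumerate(CATEGORY_MESSAGES) if cat not in covered]
-- ===== Notes on version B (the rewrite author's own statement) =====
-- stated objective: alternative
-- what changed: Inverts the traversal: instead of five separate not-any scans over the skills list, B makes a single pass over skills building a set of covered categories via a keyword-to-category map, then emits the messages of the uncovered categories.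
import Mathlib
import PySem

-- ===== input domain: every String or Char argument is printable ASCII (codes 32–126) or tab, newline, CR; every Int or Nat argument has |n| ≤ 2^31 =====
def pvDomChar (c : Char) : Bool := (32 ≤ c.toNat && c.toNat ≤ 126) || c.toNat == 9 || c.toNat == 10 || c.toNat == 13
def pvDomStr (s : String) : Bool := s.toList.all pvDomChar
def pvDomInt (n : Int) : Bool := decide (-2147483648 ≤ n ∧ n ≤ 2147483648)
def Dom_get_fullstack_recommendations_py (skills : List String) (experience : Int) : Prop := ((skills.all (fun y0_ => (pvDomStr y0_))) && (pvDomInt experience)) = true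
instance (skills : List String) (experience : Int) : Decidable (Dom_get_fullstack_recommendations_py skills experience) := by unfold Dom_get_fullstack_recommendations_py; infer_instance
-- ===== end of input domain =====

set_option maxRecDepth 4000
set_option maxHeartbeats 1000000


-- B inverts the traversal: one pass over skills builds a set of covered categories (via a
-- keyword→category map), then the messages of the uncovered categories are emitted; objective: alternative.

-- ===== PORT A =====
-- Literal transliteration: five sequential 'if not any(...)' appends, in A's order.
def get_fullstack_recommendations_py (skills : List String) (_experience : Int) : List String :=
  let recommendations : List String := []
  let recommendations := if !(skills.any (fun skill => PySem.Str.isIn "react" skill || PySem.Str.isIn "angular" skill || PySem.Str.isIn "vue" skill))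
    then recommendations ++ ["Master a modern frontend framework (React/Angular/Vue)"] else recommendations
  let recommendations := if !(skills.any (fun skill => PySem.Str.isIn "node.js" skill || PySem.Str.isIn "express" skill))
    then recommendations ++ ["Learn backend development with Node.js and Express"] else recommendations
  let recommendations := if !(skills.any (fun skill => PySem.Str.isIn "sql" skill || PySem.Str.isIn "mongodb" skill))
    then recommendations ++ ["Develop database design and querying skills"] else recommendations
  let recommendations := if !(skills.any (fun skill => PySem.Str.isIn "aws" skill || PySem.Str.isIn "docker" skill))
    then recommendations ++ ["Learn cloud deployment and containerization"] else recommendations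
  let recommendations := if !(skills.any (fun skill => PySem.Str.isIn "git" skill))
    then recommendations ++ ["Master version control with Git and GitHub"] else recommendations
  recommendations

-- ===== PORT B =====
-- Source B's KEYWORD_CATEGORY dict, iterated in insertion order.
def fsKeywordCategory : List (String × Int) :=
  [ ("react", 0), ("angular", 0), ("vue", 0),
    ("node.js", 1), ("express", 1),
    ("sql", 2), ("mongodb", 2),
    ("aws", 3), ("docker", 3),
    ("git", 4) ]

-- Source B's CATEGORY_MESSAGES list.
def fsCategoryMessages : List String :=
  [ "Master a modern frontend framework (React/Angular/Vue)",
    "Learn backend development with Node.js and Express",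
    "Develop database design and querying skills",
    "Learn cloud deployment and containerization",
    "Master version control with Git and GitHub" ]

-- One pass over skills building the covered-category set, then the uncovered messages.
def get_fullstack_recommendations_py_alt (skills : List String) (_experience : Int) : List String :=
  let covered : PySem.Set Int :=
    skills.foldl (fun covered skill =>
      fsKeywordCategory.foldl (fun covered p =>
        if PySem.Str.isIn p.1 skill then PySem.Set.add covered p.2 else covered) covered)
      PySem.Set.empty
  ((PySem.List.enumerate fsCategoryMessages).filter
    (fun p => !(PySem.Set.contains covered p.1))).map (fun p => p.2)

-- ===== PRECONDITION & SPEC =====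
def Spec_get_fullstack_recommendations_py (skills : List String) (experience : Int) (out : List String) : Prop := out = get_fullstack_recommendations_py_alt skills experience
instance (skills : List String) (experience : Int) (out : List String) : Decidable (Spec_get_fullstack_recommendations_py skills experience out) := by unfold Spec_get_fullstack_recommendations_py; infer_instance

-- ===== CLAIM (what is proved, stated in full; the proofs are below) =====
def Claim_equal_get_fullstack_recommendations_py : Prop := ∀ (skills : List String) (experience : Int), Dom_get_fullstack_recommendations_py skills experience → Spec_get_fullstack_recommendations_py skills experience (get_fullstack_recommendations_py skills experience)

-- ===== LEMMAS AND PROOFS =====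

-- Membership after the inner fold over the keyword table for one skill.
theorem mem_inner_fold (tbl : List (String × Int)) (c : PySem.Set Int) (skill : String) (i : Int) :
    ((tbl.foldl (fun covered p =>
        if PySem.Str.isIn p.1 skill then PySem.Set.add covered p.2 else covered) c).contains i)
      = (c.contains i || tbl.any (fun p => PySem.Str.isIn p.1 skill && p.2 == i)) := by
  induction tbl generalizing c with
  | nil => simp
  | cons h t ih =>
    simp only [List.foldl_cons, List.any_cons]
    cases hin : PySem.Str.isIn h.1 skill with
    | false =>
      rw [if_neg (by simp), ih]
      simp only [Bool.false_and, Bool.false_or]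
    | true =>
      rw [if_pos rfl, ih]
      have hadd : ((c.add h.2).contains i) = (c.contains i || h.2 == i) := by
        by_cases hi : h.2 = i
        · simp [PySem.Set.mem_add, hi]
        · have hi' : ¬ i = h.2 := fun e => hi e.symm
          simp [PySem.Set.mem_add, hi, hi', beq_iff_eq]
      rw [hadd, Bool.or_assoc]
      simp only [Bool.true_and]

-- Membership in the full covered set equals "some skill matches some keyword of this category".
theorem mem_covered (skills : List String) (c : PySem.Set Int) (i : Int) :
    ((skills.foldl (fun covered skill =>
        fsKeywordCategory.foldl (fun covered p =>
          if PySem.Str.isIn p.1 skill then PySem.Set.add covered p.2 else covered) covered) c).contains i)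
      = (c.contains i || skills.any (fun skill => fsKeywordCategory.any (fun p => PySem.Str.isIn p.1 skill && p.2 == i))) := by
  induction skills generalizing c with
  | nil => simp
  | cons s t ih =>
    simp only [List.foldl_cons, List.any_cons, ih, mem_inner_fold, Bool.or_assoc]

-- any over a disjunction of predicates splits into a disjunction of anys.
theorem any_or_split (l : List String) (p q : String → Bool) :
    l.any (fun x => p x || q x) = (l.any p || l.any q) := by
  induction l with
  | nil => rfl
  | cons h t ih =>
    simp only [List.any_cons, ih]
    cases p h <;> cases q h <;> simp

-- ===== VERDICT (by name: the statement is the Claim_ definition above) =====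
theorem get_fullstack_recommendations_py_spec : Claim_equal_get_fullstack_recommendations_py := by
  intro skills experience _
  show _ = _
  simp only [get_fullstack_recommendations_py, get_fullstack_recommendations_py_alt,
    fsCategoryMessages, PySem.List.enumerate_cons, PySem.List.enumerate_nil,
    List.filter_cons, List.filter_nil, mem_covered]
  simp [fsKeywordCategory, any_or_split, Bool.or_assoc, apply_ite (List.map (fun p : Int × String => p.2))]
  split_ifs <;> rfl
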